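-- pv_equiv track=rewrite | github.com/brunorisotto/ChallengeAlkemy | __app__/funciones/seleccionar_indices.py | buscar_indices
-- ===== SOURCE A (Python) =====
-- def buscar_indices(dic, columna_df):
--
--     indices = []
--     clave_dic = list(dic.values())
--
--     for indice_dic in clave_dic:
--         for indice_df in columna_df:
--             if indice_dic == indice_df:
--                 indices.append(columna_df.index(indice_df))
--
--     return indices
-- ===== SOURCE B (Python) =====
-- def buscar_indices(dic, columna_df):
--     # One pass over columna_df builds value -> count and value -> first index;
--     # then each dict value emits its first index, count times.
--     cnt = {}
--     for x in columna_df: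
--         cnt[x] = cnt.get(x, 0) + 1
--     first = {}
--     for i, x in enumerate(columna_df):
--         first.setdefault(x, i)
--     out = []
--     for v in dic.values():
--         if v in cnt:
--             out += [first[v]] * cnt[v]
--     return out
-- ===== Notes on version B (the rewrite author's own statement) =====
-- stated objective: faster
-- what changed: Replaces the nested scan (for each dict value, scan the column and call list.index per match) by one pass that builds value->count and value->first-index dicts, then emits first-index count times per dict value.
import Mathlib
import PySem

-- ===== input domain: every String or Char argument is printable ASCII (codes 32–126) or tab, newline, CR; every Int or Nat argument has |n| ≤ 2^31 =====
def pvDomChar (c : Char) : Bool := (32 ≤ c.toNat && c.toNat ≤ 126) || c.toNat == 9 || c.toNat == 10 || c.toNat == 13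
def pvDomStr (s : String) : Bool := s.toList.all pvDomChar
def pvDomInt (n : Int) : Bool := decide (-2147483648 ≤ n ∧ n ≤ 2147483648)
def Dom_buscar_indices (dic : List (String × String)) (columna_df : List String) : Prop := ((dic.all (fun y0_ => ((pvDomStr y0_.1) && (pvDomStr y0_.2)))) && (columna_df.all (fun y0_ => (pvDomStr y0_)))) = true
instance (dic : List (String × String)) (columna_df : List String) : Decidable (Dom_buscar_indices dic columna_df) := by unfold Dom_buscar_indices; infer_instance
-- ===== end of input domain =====

-- B replaces A's nested scans (and the repeated list.index call) by one pass building
-- value->count and value->first-index dicts; return value only, no mutation involved.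

-- ===== PORT A =====
-- 'columna_df.index(indice_df)' always succeeds (indice_df comes from columna_df),
-- so the '.getD 0' default is unreachable.
def buscar_indices (dic : List (String × String)) (columna_df : List String) : List Int :=
  let clave_dic := (PySem.Dict.ofList dic).values
  clave_dic.foldl (fun indices indice_dic =>
    columna_df.foldl (fun acc indice_df =>
      if indice_dic == indice_df then
        acc ++ [(((PySem.List.index? columna_df indice_df).getD 0 : Nat) : Int)]
      else acc) indices) []

-- ===== PORT B =====
def buscar_indices_alt (dic : List (String × String)) (columna_df : List String) : List Int :=
  let cnt : PySem.Dict String Int :=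
    columna_df.foldl (fun d x => d.insert x (d.getD x 0 + 1)) PySem.Dict.empty
  let first : PySem.Dict String Int :=
    (PySem.List.enumerate columna_df).foldl (fun d p => d.setdefault p.2 p.1) PySem.Dict.empty
  ((PySem.Dict.ofList dic).values).foldl (fun out v =>
    if cnt.contains v then out ++ PySem.List.pyRepeat [first.getD v 0] (cnt.getD v 0) else out) []

-- ===== PRECONDITION & SPEC =====
def Spec_buscar_indices (dic : List (String × String)) (columna_df : List String) (out : List Int) : Prop := out = buscar_indices_alt dic columna_df
instance (dic : List (String × String)) (columna_df : List String) (out : List Int) : Decidable (Spec_buscar_indices dic columna_df out) := by unfold Spec_buscar_indices; infer_instance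

-- ===== CLAIM (what is proved, stated in full; the proofs are below) =====
def Claim_equal_buscar_indices : Prop := ∀ (dic : List (String × String)) (columna_df : List String), Dom_buscar_indices dic columna_df → Spec_buscar_indices dic columna_df (buscar_indices dic columna_df)

-- ===== LEMMAS AND PROOFS =====

-- The first-index dict built from enumerate+setdefault looks up to index? cast to Int.
theorem first_get? (l : List String) (v : String) :
    ((PySem.List.enumerate l).foldl (fun d p => d.setdefault p.2 p.1)
      (PySem.Dict.empty : PySem.Dict String Int)).get? v
      = (PySem.List.index? l v).map (fun n => ((n : Nat) : Int)) := by
  induction l using List.reverseRecOn with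
  | nil => simp [PySem.List.enumerate_nil, PySem.Dict.get?_empty]
  | append_singleton l a ih =>
    rw [PySem.List.enumerate_append, List.foldl_append]
    have h1 : PySem.List.enumerate [a] ((0 : Int) + l.length) = [((l.length : Int), a)] := by
      simp [PySem.List.enumerate_cons, PySem.List.enumerate_nil]
    rw [h1]
    simp only [List.foldl_cons, List.foldl_nil]
    set d := (PySem.List.enumerate l).foldl (fun d p => d.setdefault p.2 p.1)
      (PySem.Dict.empty : PySem.Dict String Int) with hd
    by_cases hv : v = a
    · subst hv
      by_cases hm : v ∈ l
      · have hc : d.contains v = true := by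
          rw [PySem.Dict.contains_eq_isSome_get?, ih]
          simp [Option.isSome_map, hm]
        rw [PySem.Dict.setdefault_of_contains _ _ hc, ih,
            PySem.List.index?_append_of_mem _ hm]
      · have hc : d.contains v = false := by
          rw [PySem.Dict.contains_eq_isSome_get?, ih]
          simp [Option.isSome_map, hm]
        rw [PySem.Dict.setdefault_of_not_contains _ _ hc,
            PySem.Dict.get?_insert_self, PySem.List.index?_append_singleton_self _ _ hm]
        simp
    · rw [PySem.Dict.get?_setdefault_of_ne _ _ hv, ih]
      by_cases hm : v ∈ l
      · rw [PySem.List.index?_append_of_mem _ hm]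
      · have h2 : PySem.List.index? (l ++ [a]) v = none := by
          rw [PySem.List.index?_eq_none_iff]
          simp [hm, hv]
        have h3 : PySem.List.index? l v = none := by
          rw [PySem.List.index?_eq_none_iff]; exact hm
        rw [h2, h3]

-- Per dict value, A's inner scan and B's dict lookups produce the same block.
theorem step_eq (columna_df : List String) (v : String) (out : List Int) :
    columna_df.foldl (fun acc indice_df =>
      if v == indice_df then
        acc ++ [(((PySem.List.index? columna_df indice_df).getD 0 : Nat) : Int)]
      else acc) out
    = (if (columna_df.foldl (fun d x => d.insert x (d.getD x 0 + 1))
          (PySem.Dict.empty : PySem.Dict String Int)).contains v then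
        out ++ PySem.List.pyRepeat
          [((PySem.List.enumerate columna_df).foldl (fun d p => d.setdefault p.2 p.1)
              (PySem.Dict.empty : PySem.Dict String Int)).getD v 0]
          ((columna_df.foldl (fun d x => d.insert x (d.getD x 0 + 1))
              (PySem.Dict.empty : PySem.Dict String Int)).getD v 0)
      else out) := by
  rw [PySem.List.foldl_append_if]
  have hfilter : columna_df.filter (fun x => v == x) =
      List.replicate (columna_df.count v) v := by
    have : (fun x => v == x) = (fun x => x == v) := by
      funext x; simp [eq_comm]
    rw [this, List.filter_beq]
  rw [hfilter, List.map_replicate]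
  rw [PySem.Dict.foldl_insert_getD_add_one_eq_counter]
  by_cases hm : v ∈ columna_df
  · have hc : (PySem.Dict.counter columna_df).contains v = true := by
      simp [PySem.Dict.contains_counter, hm]
    rw [if_pos hc, PySem.Dict.getD_counter, PySem.List.pyRepeat_singleton,
        PySem.Dict.getD_eq_get?_getD, first_get?]
    obtain ⟨n, hn⟩ := Option.isSome_iff_exists.mp
      ((PySem.List.index?_isSome_iff (xs := columna_df) (v := v)).mpr hm)
    simp only [PySem.List.index?_eq_idxOf?] at hn
    simp [hn]
  · have hcnt : columna_df.count v = 0 := List.count_eq_zero.mpr hm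
    have hc : (PySem.Dict.counter columna_df).contains v = false := by
      simp [PySem.Dict.contains_counter, hm]
    rw [if_neg (by simp [hc]), hcnt]
    simp

-- ===== VERDICT (by name: the statement is the Claim_ definition above) =====
theorem buscar_indices_spec : Claim_equal_buscar_indices := by
  intro dic columna_df _
  unfold Spec_buscar_indices buscar_indices buscar_indices_alt
  dsimp only
  exact PySem.List.foldl_congr_mem _ _ _ _ (fun out v _ => step_eq columna_df v out)
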